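-- pv_equiv track=rewrite | github.com/sachinthakar/swar-laya-studio | mp3_to_swarlaya.py | deduplicate_consecutive
-- ===== SOURCE A (Python) =====
-- def deduplicate_consecutive(cycles):
--     """
--     Merge consecutive cycles that share the exact same note fingerprint into
--     one entry. Keeps the first occurrence of each consecutive run.
--     (Only used when --dedup flag is set.)
--     """
--     if not cycles:
--         return []
--     result = [cycles[0]]
--     for cy in cycles[1:]:
--         same_fp = (tuple(n for n, _ in cy['data']) ==
--                    tuple(n for n, _ in result[-1]['data']))
--         if not same_fp:
--             result.append(cy)
--     return result
-- ===== SOURCE B (Python) =====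
-- def deduplicate_consecutive(cycles):
--     """
--     Merge consecutive cycles that share the exact same note fingerprint into
--     one entry, keeping the first of each consecutive run.
--
--     Stateless pairwise formulation: a cycle is kept iff it is the first one
--     or its fingerprint differs from its immediate predecessor's (fingerprint
--     equality is transitive, so this equals comparing to the last kept cycle).
--     """
--     fp = lambda cy: tuple(n for n, _ in cy['data'])
--     return cycles[:1] + [b for a, b in zip(cycles, cycles[1:]) if fp(a) != fp(b)]
-- ===== Notes on version B (the rewrite author's own statement) =====
-- stated objective: idiomatic
-- what changed: Replaces A's accumulator loop that compares each cycle to result[-1] with a stateless comprehension over adjacent pairs (zip of the list with its tail), keeping a cycle iff its fingerprint differs from its immediate predecessor's; equivalent because fingerprint equality is transitive.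
import Mathlib
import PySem

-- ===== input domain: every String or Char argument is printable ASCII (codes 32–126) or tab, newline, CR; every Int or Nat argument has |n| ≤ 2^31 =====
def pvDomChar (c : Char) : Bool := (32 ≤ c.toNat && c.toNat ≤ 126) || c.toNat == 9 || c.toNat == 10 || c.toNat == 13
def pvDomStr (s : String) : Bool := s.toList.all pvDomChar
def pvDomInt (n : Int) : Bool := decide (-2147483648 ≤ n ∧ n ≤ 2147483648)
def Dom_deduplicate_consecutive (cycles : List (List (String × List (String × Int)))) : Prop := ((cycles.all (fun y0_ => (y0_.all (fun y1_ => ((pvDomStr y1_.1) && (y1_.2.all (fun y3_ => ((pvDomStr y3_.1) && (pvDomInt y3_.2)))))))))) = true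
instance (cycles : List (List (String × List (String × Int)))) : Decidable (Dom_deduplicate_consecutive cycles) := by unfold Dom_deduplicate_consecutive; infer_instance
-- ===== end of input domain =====

-- B replaces A's accumulator loop (compare to result[-1]) with a stateless
-- comprehension over adjacent pairs; same cost, plainer (objective: idiomatic).

-- shared helper: tuple(n for n, _ in cy['data']); cy is a dict (assoc list,
-- first-match lookup).  The default [] is never reached inside Pre_ (Python
-- raises KeyError there).
def noteFp (cy : List (String × List (String × Int))) : List String :=
  (((cy.find? (fun p => p.1 == "data")).map Prod.snd).getD []).map Prod.fst

-- ===== PORT A =====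
def deduplicate_consecutive (cycles : List (List (String × List (String × Int)))) : List (List (String × List (String × Int))) :=
  match cycles with
  | [] => []
  | c :: rest =>
    -- result = [cycles[0]]; for cy in cycles[1:]: append cy unless same fp as result[-1]
    rest.foldl
      (fun result cy =>
        if noteFp cy = noteFp (result.getLastD []) then result else result ++ [cy])
      [c]

-- ===== PORT B =====
def deduplicate_consecutive_alt (cycles : List (List (String × List (String × Int)))) : List (List (String × List (String × Int))) :=
  -- cycles[:1] + [b for a, b in zip(cycles, cycles[1:]) if fp(a) != fp(b)]
  cycles.take 1 ++
    ((cycles.zip cycles.tail).filter (fun p => noteFp p.1 != noteFp p.2)).map Prod.snd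

-- ===== PRECONDITION & SPEC =====
-- Pre_ excludes exactly the inputs on which the Pythons raise KeyError: two or
-- more cycles with some cycle lacking the 'data' key (on them A and B both raise).
def Pre_deduplicate_consecutive (cycles : List (List (String × List (String × Int)))) : Prop :=
  cycles.length ≤ 1 ∨ ∀ cy ∈ cycles, (cy.find? (fun p => p.1 == "data")).isSome

instance (cycles : List (List (String × List (String × Int)))) : Decidable (Pre_deduplicate_consecutive cycles) := by unfold Pre_deduplicate_consecutive; infer_instance

def pvWitness_deduplicate_consecutive : (List (List (String × List (String × Int)))) :=
  [[("data", [("sa", 1), ("re", 2)])], [("data", [("sa", 1), ("re", 2)])], [("data", [("ga", 3)])]]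

def Spec_deduplicate_consecutive (cycles : List (List (String × List (String × Int)))) (out : List (List (String × List (String × Int)))) : Prop := out = deduplicate_consecutive_alt cycles
instance (cycles : List (List (String × List (String × Int)))) (out : List (List (String × List (String × Int)))) : Decidable (Spec_deduplicate_consecutive cycles out) := by unfold Spec_deduplicate_consecutive; infer_instance

-- ===== CLAIM (what is proved, stated in full; the proofs are below) =====
def Claim_equal_deduplicate_consecutive : Prop := ∀ (cycles : List (List (String × List (String × Int)))), Dom_deduplicate_consecutive cycles → Pre_deduplicate_consecutive cycles → Spec_deduplicate_consecutive cycles (deduplicate_consecutive cycles)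

-- ===== LEMMAS AND PROOFS =====

-- A's loop, with the state reduced to the last kept cycle (the emitted prefix
-- is never read again).
def goLast (last : List (String × List (String × Int))) :
    List (List (String × List (String × Int))) → List (List (String × List (String × Int)))
  | [] => []
  | cy :: r => if noteFp cy = noteFp last then goLast last r else cy :: goLast cy r

lemma goLast_congr (a b : List (String × List (String × Int)))
    (h : noteFp a = noteFp b) :
    ∀ r, goLast a r = goLast b r := by
  intro r
  induction r with
  | nil => rfl
  | cons cy r ih =>
    simp only [goLast, h]
    split_ifs <;> simp [ih]

lemma foldl_eq_goLast
    (rest : List (List (String × List (String × Int)))) :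
    ∀ (acc : List (List (String × List (String × Int)))), acc ≠ [] →
    rest.foldl
      (fun result cy =>
        if noteFp cy = noteFp (result.getLastD []) then result else result ++ [cy])
      acc
    = acc ++ goLast (acc.getLastD []) rest := by
  induction rest with
  | nil => intro acc _; simp [goLast]
  | cons cy r ih =>
    intro acc hacc
    simp only [List.foldl_cons, goLast]
    split_ifs with h
    · exact ih acc hacc
    · rw [ih (acc ++ [cy]) (by simp), List.getLastD_concat]
      simp

lemma goLast_eq_zip
    (r : List (List (String × List (String × Int)))) :
    ∀ c, goLast c r
      = (((c :: r).zip r).filter (fun p => noteFp p.1 != noteFp p.2)).map Prod.snd := by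
  induction r with
  | nil => intro c; rfl
  | cons cy r ih =>
    intro c
    simp only [goLast, List.zip_cons_cons, List.filter_cons]
    by_cases h : noteFp c = noteFp cy
    · have hb : (noteFp c != noteFp cy) = false := by simp [h]
      rw [hb, if_pos h.symm, goLast_congr c cy h, ih cy]
      simp
    · have hb : (noteFp c != noteFp cy) = true := by simp [h]
      rw [hb, if_neg (fun e => h e.symm), ih cy]
      simp

-- ===== VERDICT (by name: the statement is the Claim_ definition above) =====
theorem deduplicate_consecutive_spec : Claim_equal_deduplicate_consecutive := by
  intro cycles _ _
  unfold Spec_deduplicate_consecutive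
  cases cycles with
  | nil => rfl
  | cons c rest =>
    simp only [deduplicate_consecutive, deduplicate_consecutive_alt]
    rw [foldl_eq_goLast rest [c] (by simp)]
    have : ([c].getLastD ([] : List (String × List (String × Int)))) = c := rfl
    rw [this, goLast_eq_zip rest c]
    rfl
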